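-- pv_equiv track=rewrite | github.com/Abdulhamid97Mousa/mosaic | 3rd_party/xuance_worker/xuance_worker/runtime.py | _normalize_method_name
-- ===== SOURCE A (Python) =====
-- _METHOD_NAME_MAP: dict[str, str] = {
--     # Policy Optimization (single-agent)
--     "PPO_Clip": "ppo",
--     "PPO_KL": "ppo",
--     "PPG": "ppg",
--     "A2C": "a2c",
--     "PG": "pg",
--     "NPG": "npg",
--     "TRPO": "trpo",
--     # Value-based (single-agent)
--     "DQN": "dqn",
--     "DDQN": "ddqn",
--     "DuelDQN": "dueldqn",
--     "NoisyDQN": "noisydqn",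
--     "C51": "c51",
--     "QRDQN": "qrdqn",
--     "PerDQN": "perdqn",
--     "DRQN": "drqn",
--     # Continuous control (single-agent)
--     "SAC": "sac",
--     "DDPG": "ddpg",
--     "TD3": "td3",
--     "TD3BC": "td3bc",
--     # Parameterized action
--     "PDQN": "pdqn",
--     "MPDQN": "mpdqn",
--     "SPDQN": "spdqn",
--     # Model-based
--     "DreamerV2": "dreamerv2",
--     "DreamerV3": "dreamerv3",
--     # Multi-agent
--     "MAPPO_Clip": "mappo",
--     "MAPPO_KL": "mappo",
--     "IPPO_Clip": "ippo",
--     "IPPO_KL": "ippo",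
--     "QMIX": "qmix",
--     "VDN": "vdn",
--     "WQMIX": "wqmix",
--     "QTRAN": "qtran",
--     "MADDPG": "maddpg",
--     "MASAC": "masac",
--     "ISAC": "isac",
--     "MATD3": "matd3",
--     "IDDPG": "iddpg",
--     "IAC": "iac",
--     "COMA": "coma",
--     "MFQ": "mfq",
--     "MFAC": "mfac",
--     "DCG": "dcg",
--     "VDAC": "vdac",
--     "IC3Net": "ic3net",
--     "CommNet": "commnet",
--     "TARMAC": "tarmac",
--     # Random baseline
--     "Random": "random",
-- }
--
-- def _normalize_method_name(method: str) -> str: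
--     """Normalize method name for XuanCe config lookup.
--
--     XuanCe's get_runner() expects lowercase method names matching
--     the config folder names (ppo, dqn, sac, etc.).
--
--     Args:
--         method: Method name from UI (e.g., "PPO_Clip", "MAPPO_Clip").
--
--     Returns:
--         Normalized lowercase method name for config lookup.
--     """
--     # Try exact match first
--     if method in _METHOD_NAME_MAP:
--         return _METHOD_NAME_MAP[method]
--
--     # Try case-insensitive match
--     method_lower = method.lower()
--     for key, value in _METHOD_NAME_MAP.items():
--         if key.lower() == method_lower:
--             return value
--
--     # Fallback: just lowercase and remove common suffixes
--     normalized = method_lower.replace("_clip", "").replace("_kl", "")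
--     return normalized
-- ===== SOURCE B (Python) =====
-- def _normalize_method_name(method: str) -> str:
--     """Closed form: every value in A's table equals its key lowercased with the
--     "_clip"/"_kl" suffixes stripped, so the table (and both lookup passes) are
--     redundant -- the fallback expression alone computes the answer for every input."""
--     return method.lower().replace("_clip", "").replace("_kl", "")
-- ===== Notes on version B (the rewrite author's own statement) =====
-- stated objective: simpler
-- what changed: Drops the 47-key mapping and both lookup passes entirely: since every table value equals its key lowercased with '_clip'/'_kl' removed, B computes the answer as the single closed-form expression method.lower().replace('_clip','').replace('_kl',''), with no table and no scan.
import Mathlib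
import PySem

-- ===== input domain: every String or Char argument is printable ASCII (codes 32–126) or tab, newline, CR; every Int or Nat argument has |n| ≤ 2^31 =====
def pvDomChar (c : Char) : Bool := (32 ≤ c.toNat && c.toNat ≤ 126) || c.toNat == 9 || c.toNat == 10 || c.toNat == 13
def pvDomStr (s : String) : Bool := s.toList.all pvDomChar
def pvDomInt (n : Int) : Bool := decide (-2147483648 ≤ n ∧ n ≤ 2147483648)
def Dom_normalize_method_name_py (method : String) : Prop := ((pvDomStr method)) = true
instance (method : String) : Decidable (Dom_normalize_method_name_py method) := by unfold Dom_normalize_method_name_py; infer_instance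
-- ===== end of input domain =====

-- B drops A's 47-key table and both lookup passes: every table value equals its key lowercased
-- with "_clip"/"_kl" stripped, so the fallback expression alone is the whole function. Objective: simpler.

set_option maxRecDepth 40000
set_option maxHeartbeats 1000000

-- ===== PORT A =====
def pvMethodPairs : List (String × String) := [
  ("PPO_Clip", "ppo"),
  ("PPO_KL", "ppo"),
  ("PPG", "ppg"),
  ("A2C", "a2c"),
  ("PG", "pg"),
  ("NPG", "npg"),
  ("TRPO", "trpo"),
  ("DQN", "dqn"),
  ("DDQN", "ddqn"),
  ("DuelDQN", "dueldqn"),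
  ("NoisyDQN", "noisydqn"),
  ("C51", "c51"),
  ("QRDQN", "qrdqn"),
  ("PerDQN", "perdqn"),
  ("DRQN", "drqn"),
  ("SAC", "sac"),
  ("DDPG", "ddpg"),
  ("TD3", "td3"),
  ("TD3BC", "td3bc"),
  ("PDQN", "pdqn"),
  ("MPDQN", "mpdqn"),
  ("SPDQN", "spdqn"),
  ("DreamerV2", "dreamerv2"),
  ("DreamerV3", "dreamerv3"),
  ("MAPPO_Clip", "mappo"),
  ("MAPPO_KL", "mappo"),
  ("IPPO_Clip", "ippo"),
  ("IPPO_KL", "ippo"),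
  ("QMIX", "qmix"),
  ("VDN", "vdn"),
  ("WQMIX", "wqmix"),
  ("QTRAN", "qtran"),
  ("MADDPG", "maddpg"),
  ("MASAC", "masac"),
  ("ISAC", "isac"),
  ("MATD3", "matd3"),
  ("IDDPG", "iddpg"),
  ("IAC", "iac"),
  ("COMA", "coma"),
  ("MFQ", "mfq"),
  ("MFAC", "mfac"),
  ("DCG", "dcg"),
  ("VDAC", "vdac"),
  ("IC3Net", "ic3net"),
  ("CommNet", "commnet"),
  ("TARMAC", "tarmac"),
  ("Random", "random")]

def pvMethodMap : PySem.Dict String String := PySem.Dict.ofList pvMethodPairs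

-- the 'for key, value in _METHOD_NAME_MAP.items(): if key.lower() == method_lower: return value' loop
def pvScanLower : List (String × String) → String → Option String
  | [], _ => none
  | (k, v) :: rest, ml => if PySem.Str.lower k == ml then some v else pvScanLower rest ml

def normalize_method_name_py (method : String) : String :=
  match pvMethodMap.get? method with          -- 'if method in _METHOD_NAME_MAP: return _METHOD_NAME_MAP[method]'
  | some v => v
  | none =>
    let method_lower := PySem.Str.lower method
    match pvScanLower pvMethodMap.items method_lower with
    | some v => v
    | none => PySem.Str.replace (PySem.Str.replace method_lower "_clip" "") "_kl" ""

-- ===== PORT B =====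
-- return method.lower().replace("_clip", "").replace("_kl", "")
def normalize_method_name_py_alt (method : String) : String :=
  PySem.Str.replace (PySem.Str.replace (PySem.Str.lower method) "_clip" "") "_kl" ""

-- ===== PRECONDITION & SPEC =====
def Spec_normalize_method_name_py (method : String) (out : String) : Prop := out = normalize_method_name_py_alt method
instance (method : String) (out : String) : Decidable (Spec_normalize_method_name_py method out) := by unfold Spec_normalize_method_name_py; infer_instance

-- ===== CLAIM =====
def Claim_equal_normalize_method_name_py : Prop := ∀ (method : String), Dom_normalize_method_name_py method → Spec_normalize_method_name_py method (normalize_method_name_py method)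

-- ===== LEMMAS AND PROOFS =====

-- the closed form B computes
def pvFallback (s : String) : String :=
  PySem.Str.replace (PySem.Str.replace s "_clip" "") "_kl" ""

lemma pvMk_eq : pvMethodMap = PySem.Dict.mk pvMethodPairs := by decide

lemma pvItems_eq : pvMethodMap.items = pvMethodPairs := by decide

-- every value of the table is the closed form of its (lowered) key
lemma pvTable_closed_form :
    ∀ kv ∈ pvMethodPairs, kv.2 = pvFallback (PySem.Str.lower kv.1) := by decide

-- the case-insensitive scan, when it hits on ml, returns pvFallback ml
lemma pvScan_closed_form (L : List (String × String))
    (hL : ∀ kv ∈ L, kv.2 = pvFallback (PySem.Str.lower kv.1)) (ml v : String)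
    (h : pvScanLower L ml = some v) : v = pvFallback ml := by
  induction L with
  | nil => simp [pvScanLower] at h
  | cons kv rest ih =>
    obtain ⟨k, w⟩ := kv
    simp only [pvScanLower] at h
    split_ifs at h with hk
    · cases h
      have := hL (k, v) (by simp)
      simpa [← (beq_iff_eq.mp hk)] using this
    · exact ih (fun kv hkv => hL kv (List.mem_cons_of_mem _ hkv)) h

-- the exact-match lookup is also a hit of the closed form (first matching key IS the key)
lemma pvGetMk_closed (L : List (String × String))
    (hL : ∀ kv ∈ L, kv.2 = pvFallback (PySem.Str.lower kv.1)) (m v : String)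
    (h : (PySem.Dict.mk L).get? m = some v) : v = pvFallback (PySem.Str.lower m) := by
  induction L with
  | nil => simp [PySem.Dict.get?] at h
  | cons kv rest ih =>
    obtain ⟨k, w⟩ := kv
    rw [PySem.Dict.get?_mk_cons] at h
    split_ifs at h with hk
    · cases h
      have := hL (k, v) (by simp)
      simpa [← (beq_iff_eq.mp hk)] using this
    · exact ih (fun kv hkv => hL kv (List.mem_cons_of_mem _ hkv)) h

-- ===== VERDICT =====
theorem normalize_method_name_py_spec : Claim_equal_normalize_method_name_py := by
  intro method _
  show normalize_method_name_py method = normalize_method_name_py_alt method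
  cases hget : pvMethodMap.get? method with
  | some v =>
    have hv : v = pvFallback (PySem.Str.lower method) :=
      pvGetMk_closed pvMethodPairs pvTable_closed_form method v (by rw [← pvMk_eq]; exact hget)
    simp only [normalize_method_name_py, normalize_method_name_py_alt, hget, hv, pvFallback]
  | none =>
    cases hscan : pvScanLower pvMethodMap.items (PySem.Str.lower method) with
    | some v =>
      have hv : v = pvFallback (PySem.Str.lower method) :=
        pvScan_closed_form pvMethodPairs pvTable_closed_form _ v (by rw [← pvItems_eq]; exact hscan)
      simp only [normalize_method_name_py, normalize_method_name_py_alt, hget, hscan, hv, pvFallback]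
    | none =>
      simp only [normalize_method_name_py, normalize_method_name_py_alt, hget, hscan]
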